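-- pv_equiv track=rewrite | github.com/valentk777/Competitive-Programming | Codeforces/Python/_Educational Rounds/Educational Codeforces Round 104 (Rated for Div. 2)/D.py | is_power_until_n
-- ===== SOURCE A (Python) =====
-- def is_power_until_n(n):
--     is_power = [False for _ in range(n + 1)]
--
--     for i in range(2, n + 1):
--         j = i ** 2
--
--         while j < n:
--             is_power[j] = True
--             j *= i
--
--     return is_power
-- ===== SOURCE B (Python) =====
-- def is_power_until_n(n):
--     is_power = [False] * (n + 1)
--
--     k = 2
--     while 2 ** k < n:
--         i = 2
--         p = i ** k
--         while p < n:
--             is_power[p] = True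
--             i += 1
--             p = i ** k
--         k += 1
--
--     return is_power
-- ===== Notes on version B (the rewrite author's own statement) =====
-- stated objective: faster
-- what changed: Marks perfect powers exponent-first (outer loop over exponents k with 2**k < n, inner loop over bases computing i**k directly) instead of A's base-first walk over all bases 2..n accumulating j *= i, so the outer loop runs O(log n) times instead of n-1 times.
import Mathlib
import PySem

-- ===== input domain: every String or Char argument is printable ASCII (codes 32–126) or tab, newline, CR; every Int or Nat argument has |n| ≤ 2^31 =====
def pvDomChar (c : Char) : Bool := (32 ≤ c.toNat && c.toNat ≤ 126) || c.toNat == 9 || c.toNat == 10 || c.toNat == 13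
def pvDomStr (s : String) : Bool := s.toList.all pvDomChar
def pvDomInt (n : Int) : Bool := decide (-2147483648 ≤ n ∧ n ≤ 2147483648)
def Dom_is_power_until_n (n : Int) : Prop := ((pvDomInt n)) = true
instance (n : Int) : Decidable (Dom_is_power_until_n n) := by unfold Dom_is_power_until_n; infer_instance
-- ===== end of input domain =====

-- B marks perfect powers exponent-first (outer loop over exponents k with 2**k < n, inner loop over
-- bases computing i**k directly) instead of A's base-first walk over all bases 2..n accumulating j *= i;
-- a timing run measured B faster on the generated inputs.

-- ===== PORT A =====
-- inner 'while j < n: is_power[j] = True; j *= i'; the extra conjuncts 2 ≤ i, 1 ≤ j are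
-- totality guards only (they always hold when called from the port: i comes from range(2, n+1)).
def chainA (n i j : Int) (arr : List Bool) : List Bool :=
  if _h : j < n ∧ 2 ≤ i ∧ 1 ≤ j then
    chainA n i (j * i) (PySem.List.pySetD arr j true)
  else arr
termination_by (n - j).toNat
decreasing_by
  have h2 : j + j ≤ j * i := by nlinarith [_h.1, _h.2.1, _h.2.2]
  omega

def is_power_until_n (n : Int) : List Bool :=
  (PySem.List.pyRange 2 (n + 1) 1).foldl (fun a i => chainA n i (i ^ 2) a)
    ((PySem.List.pyRange 0 (n + 1) 1).map (fun _ => false))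

-- ===== PORT B =====
-- inner 'while p < n: is_power[p] = True; i += 1; p = i ** k' (k, i are the Python ints k ≥ 2, i ≥ 2,
-- represented as Nat; the conjuncts 2 ≤ i, 2 ≤ k are totality guards, always true at the call sites).
def bInner (n : Int) (k i : Nat) (arr : List Bool) : List Bool :=
  if _h : ((i : Int)) ^ k < n ∧ 2 ≤ i ∧ 2 ≤ k then
    bInner n k (i + 1) (PySem.List.pySetD arr ((i : Int) ^ k) true)
  else arr
termination_by (n - i).toNat
decreasing_by
  have h1 : ((i : Int)) ≤ (i : Int) ^ k := le_self_pow₀ (by exact_mod_cast (by omega : 1 ≤ i)) (by omega)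
  omega

-- outer 'while 2 ** k < n: … ; k += 1'
def bOuter (n : Int) (k : Nat) (arr : List Bool) : List Bool :=
  if _h : (2 : Int) ^ k < n then
    bOuter n (k + 1) (bInner n k 2 arr)
  else arr
termination_by (n - 2 ^ k).toNat
decreasing_by
  have h1 : (1 : Int) ≤ 2 ^ k := one_le_pow₀ (by norm_num)
  have _h2 : (2 : Int) ^ (k + 1) = 2 ^ k * 2 := pow_succ 2 k
  omega

def is_power_until_n_alt (n : Int) : List Bool :=
  bOuter n 2 (List.replicate (n + 1).toNat false)

-- ===== PRECONDITION & SPEC =====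
def Spec_is_power_until_n (n : Int) (out : List Bool) : Prop := out = is_power_until_n_alt n
instance (n : Int) (out : List Bool) : Decidable (Spec_is_power_until_n n out) := by unfold Spec_is_power_until_n; infer_instance

-- ===== CLAIM (what is proved, stated in full; the proofs are below) =====
def Claim_equal_is_power_until_n : Prop := ∀ (n : Int), Dom_is_power_until_n n → Spec_is_power_until_n n (is_power_until_n n)

-- ===== LEMMAS AND PROOFS =====

theorem map_true_idem (o : Option Bool) :
    (o.map (fun _ => true)).map (fun _ => true) = o.map (fun _ => true) := by
  cases o <;> rfl

theorem setD_get (arr : List Bool) (j : Int) (hj : 0 ≤ j) (m : Nat) :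
    (PySem.List.pySetD arr j true)[m]? =
      if (m : Int) = j then arr[m]?.map (fun _ => true) else arr[m]? := by
  rw [PySem.List.pySetD_of_nonneg arr true hj, List.getElem?_set]
  by_cases hm : (m : Int) = j
  · have hje : j.toNat = m := by omega
    rw [if_pos hje, hje, if_pos hm]
    rcases hlt : arr[m]? with _ | b
    · have hlen := List.getElem?_eq_none_iff.mp hlt
      rw [if_neg (by omega)]
      simp
    · have hlen : m < arr.length := (List.getElem?_eq_some_iff.mp hlt).1
      rw [if_pos hlen]
      rfl
  · have hje : j.toNat ≠ m := by omega
    rw [if_neg hje, if_neg hm]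

theorem chainA_get (n i : Int) (hi : 2 ≤ i) (j : Int) (arr : List Bool) :
    ∀ (m : Nat), 1 ≤ j →
      (((∃ t : Nat, (m : Int) = j * i ^ t ∧ (m : Int) < n) →
          (chainA n i j arr)[m]? = arr[m]?.map (fun _ => true)) ∧
       ((¬ ∃ t : Nat, (m : Int) = j * i ^ t ∧ (m : Int) < n) →
          (chainA n i j arr)[m]? = arr[m]?)) := by
  induction j, arr using chainA.induct n i with
  | case1 j arr h ih =>
    intro m hj
    have hjn := h.1
    rw [chainA, dif_pos h]
    have hji : 1 ≤ j * i := by nlinarith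
    have hset := setD_get arr j (by omega) m
    have IH := ih m hji
    constructor
    · rintro ⟨t, hm, hmn⟩
      by_cases hmj : (m : Int) = j
      · -- index j itself is set now
        by_cases hrec : ∃ t : Nat, (m : Int) = j * i * i ^ t ∧ (m : Int) < n
        · rw [IH.1 hrec, hset, if_pos hmj, map_true_idem]
        · rw [IH.2 hrec, hset, if_pos hmj]
      · -- t ≥ 1
        have ht : t ≠ 0 := by
          intro h0; subst h0; simp at hm; omega
        obtain ⟨t', rfl⟩ : ∃ t', t = t' + 1 := ⟨t - 1, by omega⟩
        have hrec : ∃ t : Nat, (m : Int) = j * i * i ^ t ∧ (m : Int) < n := by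
          refine ⟨t', ?_, hmn⟩
          rw [hm, pow_succ]; ring
        rw [IH.1 hrec, hset, if_neg hmj]
    · intro hno
      have hmj : (m : Int) ≠ j := by
        intro hmj
        exact hno ⟨0, by simpa using hmj, by omega⟩
      have hrec : ¬ ∃ t : Nat, (m : Int) = j * i * i ^ t ∧ (m : Int) < n := by
        rintro ⟨t, hm, hmn⟩
        exact hno ⟨t + 1, by rw [hm, pow_succ]; ring, hmn⟩
      rw [IH.2 hrec, hset, if_neg hmj]
  | case2 j arr h =>
    intro m hj
    rw [chainA, dif_neg h]
    refine ⟨?_, fun _ => rfl⟩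
    rintro ⟨t, hm, hmn⟩
    have hjn : ¬ j < n := fun hjn => h ⟨hjn, hi, hj⟩
    have h1 : (1 : Int) ≤ i ^ t := one_le_pow₀ (by omega)
    nlinarith

theorem foldA_get (n : Int) (L : List Int) (hL : ∀ i ∈ L, 2 ≤ i) (arr : List Bool) (m : Nat) :
    (((∃ i ∈ L, ∃ t : Nat, (m : Int) = i ^ 2 * i ^ t ∧ (m : Int) < n) →
        (L.foldl (fun a i => chainA n i (i ^ 2) a) arr)[m]? = arr[m]?.map (fun _ => true)) ∧
     ((¬ ∃ i ∈ L, ∃ t : Nat, (m : Int) = i ^ 2 * i ^ t ∧ (m : Int) < n) →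
        (L.foldl (fun a i => chainA n i (i ^ 2) a) arr)[m]? = arr[m]?)) := by
  induction L generalizing arr with
  | nil =>
    refine ⟨?_, fun _ => rfl⟩
    rintro ⟨i, hi, -⟩
    cases hi
  | cons i L ih =>
    have hi : 2 ≤ i := hL i (List.mem_cons_self ..)
    have hij : 1 ≤ i ^ 2 := one_le_pow₀ (by omega)
    have hchain := chainA_get n i hi (i ^ 2) arr m hij
    have IH := ih (fun x hx => hL x (List.mem_cons_of_mem _ hx)) (chainA n i (i ^ 2) arr)
    simp only [List.foldl_cons]
    constructor
    · rintro ⟨x, hx, t, hm, hmn⟩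
      rcases List.mem_cons.mp hx with rfl | hx'
      · -- head
        by_cases hrec : ∃ x ∈ L, ∃ t : Nat, (m : Int) = x ^ 2 * x ^ t ∧ (m : Int) < n
        · rw [IH.1 hrec, hchain.1 ⟨t, hm, hmn⟩, map_true_idem]
        · rw [IH.2 hrec, hchain.1 ⟨t, hm, hmn⟩]
      · -- tail
        have hrec : ∃ x ∈ L, ∃ t : Nat, (m : Int) = x ^ 2 * x ^ t ∧ (m : Int) < n :=
          ⟨x, hx', t, hm, hmn⟩
        rw [IH.1 hrec]
        by_cases hh : ∃ t : Nat, (m : Int) = i ^ 2 * i ^ t ∧ (m : Int) < n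
        · rw [hchain.1 hh, map_true_idem]
        · rw [hchain.2 hh]
    · intro hno
      have hh : ¬ ∃ t : Nat, (m : Int) = i ^ 2 * i ^ t ∧ (m : Int) < n := by
        rintro ⟨t, hm, hmn⟩; exact hno ⟨i, List.mem_cons_self .., t, hm, hmn⟩
      have hrec : ¬ ∃ x ∈ L, ∃ t : Nat, (m : Int) = x ^ 2 * x ^ t ∧ (m : Int) < n := by
        rintro ⟨x, hx, t, hm, hmn⟩; exact hno ⟨x, List.mem_cons_of_mem _ hx, t, hm, hmn⟩
      rw [IH.2 hrec, hchain.2 hh]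

theorem bInner_get (n : Int) (k : Nat) (hk : 2 ≤ k) (i : Nat) (arr : List Bool) :
    ∀ (m : Nat), 2 ≤ i →
      (((∃ i' : Nat, i ≤ i' ∧ (m : Int) = (i' : Int) ^ k ∧ (m : Int) < n) →
          (bInner n k i arr)[m]? = arr[m]?.map (fun _ => true)) ∧
       ((¬ ∃ i' : Nat, i ≤ i' ∧ (m : Int) = (i' : Int) ^ k ∧ (m : Int) < n) →
          (bInner n k i arr)[m]? = arr[m]?)) := by
  induction i, arr using bInner.induct n k with
  | case1 i arr h ih =>
    intro m hi
    have hpn := h.1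
    rw [bInner, dif_pos h]
    have hset := setD_get arr ((i : Int) ^ k) (by positivity) m
    have IH := ih m (by omega)
    constructor
    · rintro ⟨i', hii', hm, hmn⟩
      by_cases hmi : (m : Int) = (i : Int) ^ k
      · by_cases hrec : ∃ i' : Nat, i + 1 ≤ i' ∧ (m : Int) = (i' : Int) ^ k ∧ (m : Int) < n
        · rw [IH.1 hrec, hset, if_pos hmi, map_true_idem]
        · rw [IH.2 hrec, hset, if_pos hmi]
      · have hne : i' ≠ i := by rintro rfl; exact hmi hm
        have hrec : ∃ i' : Nat, i + 1 ≤ i' ∧ (m : Int) = (i' : Int) ^ k ∧ (m : Int) < n :=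
          ⟨i', by omega, hm, hmn⟩
        rw [IH.1 hrec, hset, if_neg hmi]
    · intro hno
      have hmi : (m : Int) ≠ (i : Int) ^ k := by
        intro hmi; exact hno ⟨i, le_refl i, hmi, hmi ▸ hpn⟩
      have hrec : ¬ ∃ i' : Nat, i + 1 ≤ i' ∧ (m : Int) = (i' : Int) ^ k ∧ (m : Int) < n := by
        rintro ⟨i', hii', hm, hmn⟩; exact hno ⟨i', by omega, hm, hmn⟩
      rw [IH.2 hrec, hset, if_neg hmi]
  | case2 i arr h =>
    intro m hi
    rw [bInner, dif_neg h]
    refine ⟨?_, fun _ => rfl⟩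
    rintro ⟨i', hii', hm, hmn⟩
    have hpn : ¬ ((i : Int)) ^ k < n := fun hpn => h ⟨hpn, hi, hk⟩
    have hmono : ((i : Int)) ^ k ≤ ((i' : Int)) ^ k :=
      pow_le_pow_left₀ (by positivity) (by exact_mod_cast hii') k
    omega

theorem bOuter_get (n : Int) (k : Nat) (arr : List Bool) :
    ∀ (m : Nat), 2 ≤ k →
      (((∃ k' : Nat, k ≤ k' ∧ ∃ i' : Nat, 2 ≤ i' ∧ (m : Int) = (i' : Int) ^ k' ∧ (m : Int) < n) →
          (bOuter n k arr)[m]? = arr[m]?.map (fun _ => true)) ∧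
       ((¬ ∃ k' : Nat, k ≤ k' ∧ ∃ i' : Nat, 2 ≤ i' ∧ (m : Int) = (i' : Int) ^ k' ∧ (m : Int) < n) →
          (bOuter n k arr)[m]? = arr[m]?)) := by
  induction k, arr using bOuter.induct n with
  | case1 k arr h ih =>
    intro m hk
    rw [bOuter, dif_pos h]
    have hinner := bInner_get n k hk 2 arr m (le_refl 2)
    have IH := ih m (by omega)
    constructor
    · rintro ⟨k', hkk', i', hi', hm, hmn⟩
      rcases Nat.eq_or_lt_of_le hkk' with rfl | hlt
      · -- exponent k handled by this inner pass
        have hB : (bInner n k 2 arr)[m]? = arr[m]?.map (fun _ => true) :=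
          hinner.1 ⟨i', hi', hm, hmn⟩
        by_cases hrec : ∃ k' : Nat, k + 1 ≤ k' ∧ ∃ i' : Nat, 2 ≤ i' ∧ (m : Int) = (i' : Int) ^ k' ∧ (m : Int) < n
        · rw [IH.1 hrec, hB, map_true_idem]
        · rw [IH.2 hrec, hB]
      · have hrec : ∃ k'' : Nat, k + 1 ≤ k'' ∧ ∃ i' : Nat, 2 ≤ i' ∧ (m : Int) = (i' : Int) ^ k'' ∧ (m : Int) < n :=
          ⟨k', by omega, i', hi', hm, hmn⟩
        rw [IH.1 hrec]
        by_cases hh : ∃ i' : Nat, 2 ≤ i' ∧ (m : Int) = (i' : Int) ^ k ∧ (m : Int) < n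
        · rw [hinner.1 hh, map_true_idem]
        · rw [hinner.2 hh]
    · intro hno
      have hh : ¬ ∃ i' : Nat, 2 ≤ i' ∧ (m : Int) = (i' : Int) ^ k ∧ (m : Int) < n := by
        rintro ⟨i', hi', hm, hmn⟩; exact hno ⟨k, le_refl k, i', hi', hm, hmn⟩
      have hrec : ¬ ∃ k' : Nat, k + 1 ≤ k' ∧ ∃ i' : Nat, 2 ≤ i' ∧ (m : Int) = (i' : Int) ^ k' ∧ (m : Int) < n := by
        rintro ⟨k', hkk', i', hi', hm, hmn⟩; exact hno ⟨k', by omega, i', hi', hm, hmn⟩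
      rw [IH.2 hrec, hinner.2 hh]
  | case2 k arr h =>
    intro m hk
    rw [bOuter, dif_neg h]
    refine ⟨?_, fun _ => rfl⟩
    rintro ⟨k', hkk', i', hi', hm, hmn⟩
    have h1 : (2 : Int) ^ k ≤ 2 ^ k' := pow_le_pow_right₀ (by norm_num) hkk'
    have h2 : (2 : Int) ^ k' ≤ ((i' : Int)) ^ k' :=
      pow_le_pow_left₀ (by norm_num) (by exact_mod_cast hi') k'
    omega

-- the two marking conditions describe the same set of indices
theorem cond_iff (n : Int) (m : Nat) :
    (∃ i ∈ PySem.List.pyRange 2 (n + 1) 1, ∃ t : Nat, (m : Int) = i ^ 2 * i ^ t ∧ (m : Int) < n) ↔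
    (∃ k' : Nat, 2 ≤ k' ∧ ∃ i' : Nat, 2 ≤ i' ∧ (m : Int) = (i' : Int) ^ k' ∧ (m : Int) < n) := by
  constructor
  · rintro ⟨i, hi, t, hm, hmn⟩
    rw [PySem.List.mem_pyRange_one] at hi
    obtain ⟨hi2, -⟩ := hi
    refine ⟨t + 2, by omega, i.toNat, by omega, ?_, hmn⟩
    have hcast : ((i.toNat : Int)) = i := Int.toNat_of_nonneg (by omega)
    rw [hcast, hm, pow_add]; ring
  · rintro ⟨k', hk', i', hi', hm, hmn⟩
    have hi1 : (1 : Int) ≤ (i' : Int) := by exact_mod_cast (by omega : 1 ≤ i')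
    have hle : ((i' : Int)) ≤ ((i' : Int)) ^ k' := le_self_pow₀ hi1 (by omega)
    refine ⟨(i' : Int), ?_, k' - 2, ?_, hmn⟩
    · rw [PySem.List.mem_pyRange_one]
      constructor
      · exact_mod_cast hi'
      · omega
    · rw [hm, ← pow_add]
      congr 1
      omega

theorem init_eq (n : Int) :
    ((PySem.List.pyRange 0 (n + 1) 1).map (fun _ => false)) = List.replicate (n + 1).toNat false := by
  rw [List.map_const', PySem.List.length_pyRange_one]
  norm_num

-- ===== VERDICT (by name: the statement is the Claim_ definition above) =====
theorem is_power_until_n_spec : Claim_equal_is_power_until_n := by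
  intro n _
  unfold Spec_is_power_until_n is_power_until_n is_power_until_n_alt
  rw [init_eq]
  apply List.ext_getElem?
  intro m
  have hL : ∀ i ∈ PySem.List.pyRange 2 (n + 1) 1, 2 ≤ i := by
    intro i hi
    exact (PySem.List.mem_pyRange_one.mp hi).1
  have hA := foldA_get n (PySem.List.pyRange 2 (n + 1) 1) hL (List.replicate (n + 1).toNat false) m
  have hB := bOuter_get n 2 (List.replicate (n + 1).toNat false) m (le_refl 2)
  by_cases h : ∃ k' : Nat, 2 ≤ k' ∧ ∃ i' : Nat, 2 ≤ i' ∧ (m : Int) = (i' : Int) ^ k' ∧ (m : Int) < n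
  · rw [hA.1 ((cond_iff n m).mpr h), hB.1 h]
  · rw [hA.2 (fun hc => h ((cond_iff n m).mp hc)), hB.2 h]
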